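-- pv_equiv track=rewrite | github.com/IIHTDevelopers/Yaksha-Python-A18-dictionaries--Wildlife_Convservation_Tracking_System-Template | wildlife_conservation_tracking_system.py | create_population_brackets
-- ===== SOURCE A (Python) =====
-- def create_population_brackets(species_data):
--     """
--     Group species into population brackets.
--
--     Args:
--         species_data (dict): The species data dictionary
--
--     Returns:
--         dict: Dictionary with population brackets as keys and lists of species IDs as values
--     """
--     if species_data is None:
--         raise ValueError("Species data cannot be None")
--
--     population_brackets = {
--         "critical": [],       # 0-500
--         "endangered": [],    # 501-5000
--         "vulnerable": [],    # 5001-20000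
--         "stable": []         # 20001+
--     }
--
--     for sid, species in species_data.items():
--         population = species["population"]
--         if population <= 500:
--             population_brackets["critical"].append(sid)
--         elif population <= 5000:
--             population_brackets["endangered"].append(sid)
--         elif population <= 20000:
--             population_brackets["vulnerable"].append(sid)
--         else:
--             population_brackets["stable"].append(sid)
--
--     return population_brackets
-- ===== SOURCE B (Python) =====
-- import bisect
--
-- def create_population_brackets(species_data):
--     if species_data is None:
--         raise ValueError("Species data cannot be None")
--     thresholds = [500, 5000, 20000]
--     names = ["critical", "endangered", "vulnerable", "stable"]
--     return {
--         name: [sid for sid, species in species_data.items()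
--                if bisect.bisect_left(thresholds, species["population"]) == i]
--         for i, name in enumerate(names)
--     }
-- ===== Notes on version B (the rewrite author's own statement) =====
-- stated objective: idiomatic
-- what changed: Replaces the single pass with four mutated accumulator lists and an if/elif chain by a table-driven dict comprehension: bracket membership is computed by bisect.bisect_left over the threshold table and each bracket's list is built by its own comprehension.
import Mathlib
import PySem

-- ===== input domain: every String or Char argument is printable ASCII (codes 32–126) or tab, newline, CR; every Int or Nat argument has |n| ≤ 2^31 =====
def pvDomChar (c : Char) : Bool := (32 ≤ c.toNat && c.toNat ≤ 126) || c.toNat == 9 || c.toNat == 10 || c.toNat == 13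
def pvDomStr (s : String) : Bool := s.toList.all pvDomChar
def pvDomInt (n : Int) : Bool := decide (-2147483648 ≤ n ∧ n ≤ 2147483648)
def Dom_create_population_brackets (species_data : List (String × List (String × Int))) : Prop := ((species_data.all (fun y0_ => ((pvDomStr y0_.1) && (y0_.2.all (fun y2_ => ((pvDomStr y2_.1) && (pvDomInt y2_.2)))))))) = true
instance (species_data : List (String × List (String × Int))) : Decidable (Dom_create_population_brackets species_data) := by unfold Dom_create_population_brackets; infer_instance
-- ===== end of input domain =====

-- ===== PORT A =====
-- B replaces A's if/elif chain and four mutated accumulators by a table-driven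
-- comprehension per bracket using bisect_left over the thresholds (idiomatic; same O(n) cost).
-- Loop of A: one pass appending each sid to one of the four accumulator lists.
-- Where the inner dict has no "population" key Python raises KeyError: excluded by Pre_ (the port skips there).
def cpbLoop : List (String × List (String × Int)) →
    List String × List String × List String × List String →
    List String × List String × List String × List String
  | [], st => st
  | (sid, species) :: rest, (c, e, v, s) =>
    match species.lookup "population" with
    | none => cpbLoop rest (c, e, v, s)
    | some population =>
      if population ≤ 500 then cpbLoop rest (c ++ [sid], e, v, s)
      else if population ≤ 5000 then cpbLoop rest (c, e ++ [sid], v, s)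
      else if population ≤ 20000 then cpbLoop rest (c, e, v ++ [sid], s)
      else cpbLoop rest (c, e, v, s ++ [sid])

def create_population_brackets (species_data : List (String × List (String × Int))) : List (String × List String) :=
  match cpbLoop species_data ([], [], [], []) with
  | (c, e, v, s) => [("critical", c), ("endangered", e), ("vulnerable", v), ("stable", s)]

-- ===== PORT B =====
-- selector of B's comprehension for bracket index i (none where Python raises KeyError; excluded by Pre_)
def cpbSel (i : Int) (x : String × List (String × Int)) : Option String :=
  match x.2.lookup "population" with
  | none => none
  | some p => if (PySem.List.bisectLeft [500, 5000, 20000] p : Int) = i then some x.1 else none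

def create_population_brackets_alt (species_data : List (String × List (String × Int))) : List (String × List String) :=
  (PySem.List.enumerate ["critical", "endangered", "vulnerable", "stable"]).map
    (fun iname => (iname.2, species_data.filterMap (cpbSel iname.1)))

-- ===== PRECONDITION & SPEC =====
-- Pre_ admits exactly the inputs where Python A returns: every species dict must contain
-- the "population" key (otherwise A raises KeyError).
def Pre_create_population_brackets (species_data : List (String × List (String × Int))) : Prop :=
  ∀ x ∈ species_data, (x.2.lookup "population").isSome
instance (species_data : List (String × List (String × Int))) : Decidable (Pre_create_population_brackets species_data) := by
  unfold Pre_create_population_brackets; infer_instance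
def pvWitness_create_population_brackets : (List (String × List (String × Int))) :=
  [("sp1", [("population", 300)]), ("sp2", [("population", 7000)])]
def Spec_create_population_brackets (species_data : List (String × List (String × Int))) (out : List (String × List String)) : Prop := out = create_population_brackets_alt species_data
instance (species_data : List (String × List (String × Int))) (out : List (String × List String)) : Decidable (Spec_create_population_brackets species_data out) := by unfold Spec_create_population_brackets; infer_instance

-- ===== CLAIM (what is proved, stated in full; the proofs are below) =====
def Claim_equal_create_population_brackets : Prop := ∀ (species_data : List (String × List (String × Int))), Dom_create_population_brackets species_data → Pre_create_population_brackets species_data → Spec_create_population_brackets species_data (create_population_brackets species_data)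

-- ===== LEMMAS AND PROOFS =====

-- bisect_left over the literal threshold table, as a chain of comparisons
theorem cpb_bisect_eq (p : Int) : ((PySem.List.bisectLeft [500, 5000, 20000] p : Nat) : Int) =
    (if p ≤ 500 then 0 else if p ≤ 5000 then 1 else if p ≤ 20000 then 2 else 3) := by
  have : PySem.List.bisectLeft [500, 5000, 20000] p =
      (if p ≤ 500 then 0 else if p ≤ 5000 then 1 else if p ≤ 20000 then 2 else 3) := by
    simp [PySem.List.bisectLeft, PySem.List.bisectLeftLoop]
    split_ifs <;> omega
  rw [this]; split_ifs <;> rfl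
theorem cpbSel_none {i : Int} {sid : String} {species : List (String × Int)}
    (h : List.lookup "population" species = none) : cpbSel i (sid, species) = none := by
  simp [cpbSel, h]
theorem cpbSel_some {i p : Int} {sid : String} {species : List (String × Int)}
    (h : List.lookup "population" species = some p) :
    cpbSel i (sid, species) =
      (if (if p ≤ 500 then (0:Int) else if p ≤ 5000 then 1 else if p ≤ 20000 then 2 else 3) = i
       then some sid else none) := by
  simp [cpbSel, h, cpb_bisect_eq]
theorem cpbLoop_eq (l : List (String × List (String × Int)))
    (c e v s : List String) :
    cpbLoop l (c, e, v, s) =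
      (c ++ l.filterMap (cpbSel 0), e ++ l.filterMap (cpbSel 1),
       v ++ l.filterMap (cpbSel 2), s ++ l.filterMap (cpbSel 3)) := by
  induction l generalizing c e v s with
  | nil => simp [cpbLoop]
  | cons x rest ih =>
    obtain ⟨sid, species⟩ := x
    simp only [cpbLoop, List.filterMap_cons]
    cases hl : List.lookup "population" species with
    | none => simp [cpbSel_none hl, ih]
    | some p =>
      simp only [cpbSel_some hl]
      by_cases h1 : p ≤ 500
      · simp [h1, ih, List.append_assoc]
      · by_cases h2 : p ≤ 5000
        · simp [h1, h2, ih, List.append_assoc]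
        · by_cases h3 : p ≤ 20000
          · simp [h1, h2, h3, ih, List.append_assoc]
          · simp [h1, h2, h3, ih, List.append_assoc]

-- ===== VERDICT (by name: the statement is the Claim_ definition above) =====
theorem create_population_brackets_spec : Claim_equal_create_population_brackets := by
  intro sd _ _
  show create_population_brackets sd = create_population_brackets_alt sd
  simp [create_population_brackets, create_population_brackets_alt, cpbLoop_eq,
        PySem.List.enumerate]
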